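-- pv_equiv track=rewrite | github.com/kemiljk/design-engineer | scripts/convert-bullet-lists.py | is_bullet_list
-- ===== SOURCE A (Python) =====
-- def is_bullet_list(text: str) -> bool:
--     """Check if text is already in bullet list format."""
--     lines = text.strip().split('\n')
--     if not lines:
--         return False
--
--     # Check if first few non-empty lines start with "- "
--     bullet_count = 0
--     for line in lines[:5]:  # Check first 5 lines
--         stripped = line.strip()
--         if stripped:
--             if stripped.startswith('- '):
--                 bullet_count += 1
--             else:
--                 # If we find a non-bullet line before bullets, it's not a bullet list
--                 if bullet_count == 0:
--                     return False
--
--     # If at least one bullet found, consider it a bullet list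
--     return bullet_count > 0
-- ===== SOURCE B (Python) =====
-- def is_bullet_list(text: str) -> bool:
--     """Check if text is already in bullet list format."""
--     for line in text.strip().split('\n')[:5]:
--         stripped = line.strip()
--         if stripped:
--             return stripped.startswith('- ')
--     return False
-- ===== Notes on version B (the rewrite author's own statement) =====
-- stated objective: simpler
-- what changed: B replaces A's bullet_count accumulator loop (and the dead empty-list guard) with an early return on the first non-empty line among the first 5, whose prefix alone determines the answer.
import Mathlib
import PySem

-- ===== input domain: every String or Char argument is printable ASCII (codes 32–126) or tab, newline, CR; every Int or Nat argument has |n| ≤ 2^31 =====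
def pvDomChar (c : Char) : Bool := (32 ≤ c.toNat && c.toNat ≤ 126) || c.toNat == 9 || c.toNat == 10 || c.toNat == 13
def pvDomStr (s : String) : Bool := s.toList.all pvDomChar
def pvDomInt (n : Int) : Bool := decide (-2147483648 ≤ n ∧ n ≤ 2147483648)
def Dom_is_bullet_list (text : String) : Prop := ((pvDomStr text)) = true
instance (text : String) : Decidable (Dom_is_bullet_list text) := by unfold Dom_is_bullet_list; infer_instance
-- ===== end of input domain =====

-- B replaces A's bullet_count accumulator loop with an early return on the first
-- non-empty line among the first 5; objective: simpler.

-- ===== PORT A =====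
-- the for-loop over lines[:5] with the bullet_count accumulator and the early 'return False'
def pvLoopA : List (List Char) → Nat → Bool
  | [], count => decide (0 < count)
  | l :: ls, count =>
    let stripped := PySem.Chars.strip l
    if stripped = [] then pvLoopA ls count
    else if PySem.Chars.startswith stripped ['-', ' '] then pvLoopA ls (count + 1)
    else if count = 0 then false
    else pvLoopA ls count

def is_bullet_list (text : String) : Bool :=
  let lines := PySem.Chars.splitOn (PySem.Chars.strip text.toList) ['\n']
  if lines = [] then false
  else pvLoopA (PySem.List.slice lines none (some 5)) 0

-- ===== PORT B =====
-- return on the first non-empty line among the first 5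
def pvLoopB : List (List Char) → Bool
  | [] => false
  | l :: ls =>
    let stripped := PySem.Chars.strip l
    if stripped = [] then pvLoopB ls
    else PySem.Chars.startswith stripped ['-', ' ']

def is_bullet_list_alt (text : String) : Bool :=
  pvLoopB (PySem.List.slice (PySem.Chars.splitOn (PySem.Chars.strip text.toList) ['\n']) none (some 5))

-- ===== PRECONDITION & SPEC =====
def Spec_is_bullet_list (text : String) (out : Bool) : Prop := out = is_bullet_list_alt text
instance (text : String) (out : Bool) : Decidable (Spec_is_bullet_list text out) := by unfold Spec_is_bullet_list; infer_instance

-- ===== CLAIM (what is proved, stated in full; the proofs are below) =====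
def Claim_equal_is_bullet_list : Prop := ∀ (text : String), Dom_is_bullet_list text → Spec_is_bullet_list text (is_bullet_list text)

-- ===== LEMMAS AND PROOFS =====

-- once a bullet has been counted, A's loop can only answer true
theorem pvLoopA_pos (ls : List (List Char)) : ∀ count : Nat, 0 < count → pvLoopA ls count = true := by
  induction ls with
  | nil => intro count h; simp [pvLoopA, h]
  | cons l ls ih =>
    intro count h
    simp only [pvLoopA]
    split_ifs with h1 h2 h3
    · exact ih count h
    · exact ih (count + 1) (Nat.succ_pos count)
    · omega
    · exact ih count h

theorem pvLoopA_eq_pvLoopB (ls : List (List Char)) : pvLoopA ls 0 = pvLoopB ls := by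
  induction ls with
  | nil => rfl
  | cons l ls ih =>
    simp only [pvLoopA, pvLoopB]
    split_ifs with h1 h2
    · exact ih
    · simp [pvLoopA_pos ls 1 Nat.one_pos, h2]
    · simp [Bool.eq_false_iff.mpr h2]

-- ===== VERDICT (by name: the statement is the Claim_ definition above) =====
theorem is_bullet_list_spec : Claim_equal_is_bullet_list := by
  intro text _
  unfold Spec_is_bullet_list is_bullet_list is_bullet_list_alt
  by_cases h : PySem.Chars.splitOn (PySem.Chars.strip text.toList) ['\n'] = []
  · simp [h, PySem.List.slice, pvLoopB]
  · simp [h, pvLoopA_eq_pvLoopB]
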